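-- pv_equiv track=rewrite | github.com/TangxinKevin/RGB_action_recognition | data.py | rescale_list
-- ===== SOURCE A (Python) =====
-- from itertools import chain
--
-- def rescale_list(input_list, size):
--     """
--     Given a list and a size, return a rescaled/samples list. For example, if
--     we want a list of size 5 and we have a list of size 25, return a new
--     list of size which is every 5th element of the origina list.
--     """
--
--     if len(input_list) >= size:
--         # Get the number to skip between iterations.
--         skip = len(input_list) // size
--
--         # Build our new output.
--         output = [input_list[i] for i in range(0, len(input_list), skip)]
--     else:
--         temp = []
--         copy = size // len(input_list)
--         for a_input in input_list:
--             temp.append([a_input] * copy)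
--         while len(temp) < size:
--             temp.append([input_list[-1]])
--         output = list(chain.from_iterable(temp))
--     return output[:size]
-- ===== SOURCE B (Python) =====
-- def rescale_list(input_list, size):
--     """Rescale input_list to size by a direct per-output-position index formula."""
--     n = len(input_list)
--     if n >= size:
--         skip = n // size
--         return [input_list[i * skip] for i in range(size)]
--     else:
--         copy = size // n
--         return [input_list[min(j // copy, n - 1)] for j in range(size)]
-- ===== Notes on version B (the rewrite author's own statement) =====
-- stated objective: simpler
-- what changed: Both branches are replaced by a single per-output-position index formula: downsampling returns input_list[i*skip] for i in range(size) instead of a stepped range comprehension truncated by slicing, and upsampling returns input_list[min(j//copy, len-1)] for j in range(size), eliminating the list-of-lists, the padding while-loop, chain.from_iterable and the final truncation.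
import Mathlib
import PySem

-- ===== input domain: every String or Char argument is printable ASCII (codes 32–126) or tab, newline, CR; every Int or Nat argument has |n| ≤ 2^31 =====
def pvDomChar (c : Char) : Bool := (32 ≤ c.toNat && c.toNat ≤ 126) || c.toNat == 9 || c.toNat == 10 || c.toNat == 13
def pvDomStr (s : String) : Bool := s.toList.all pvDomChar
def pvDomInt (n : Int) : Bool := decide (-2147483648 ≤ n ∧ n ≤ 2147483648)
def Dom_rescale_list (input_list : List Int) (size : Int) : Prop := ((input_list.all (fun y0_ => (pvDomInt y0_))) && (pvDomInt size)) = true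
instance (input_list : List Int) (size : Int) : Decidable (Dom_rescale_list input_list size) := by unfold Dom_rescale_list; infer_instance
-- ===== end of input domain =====

-- B replaces A's build-then-truncate (range-with-step slicing / list-of-lists + pad loop + flatten)
-- by a direct per-output-position index formula; same return value on Pre_ (simpler, no speed claim).

-- ===== PORT A =====
-- the 'while len(temp) < size: temp.append([input_list[-1]])' loop of A
def padTemp (input_list : List Int) (size : Int) (temp : List (List Int)) : List (List Int) :=
  if (temp.length : Int) < size then
    padTemp input_list size (temp ++ [[PySem.List.pyGetD input_list (-1) 0]])
  else temp
termination_by (size - (temp.length : Int)).toNat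
decreasing_by simp; omega

def rescale_list (input_list : List Int) (size : Int) : List Int :=
  let output :=
    if (input_list.length : Int) ≥ size then
      -- skip = len(input_list) // size ; [input_list[i] for i in range(0, len, skip)]
      let skip := PySem.Int.floordiv (input_list.length : Int) size
      (PySem.List.pyRange 0 (input_list.length : Int) skip).map
        (fun i => PySem.List.pyGetD input_list i 0)
    else
      -- copy = size // len ; temp = [[x]*copy for x] ; pad ; chain.from_iterable
      let copy := PySem.Int.floordiv size (input_list.length : Int)
      let temp := input_list.foldl (fun acc a => acc ++ [List.replicate copy.toNat a]) []
      (padTemp input_list size temp).flatten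
  PySem.List.slice output none (some size)   -- output[:size]

-- ===== PORT B =====
def rescale_list_alt (input_list : List Int) (size : Int) : List Int :=
  let n : Int := input_list.length
  if n ≥ size then
    let skip := PySem.Int.floordiv n size
    (PySem.List.pyRange 0 size 1).map (fun i => PySem.List.pyGetD input_list (i * skip) 0)
  else
    let copy := PySem.Int.floordiv size n
    (PySem.List.pyRange 0 size 1).map
      (fun j => PySem.List.pyGetD input_list (min (PySem.Int.floordiv j copy) (n - 1)) 0)

-- ===== PRECONDITION & SPEC =====
-- Pre_ excludes only inputs where A raises: size = 0 (ZeroDivisionError computing len//size),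
-- and the empty list (ZeroDivisionError for size > 0, range-step-zero ValueError for size < 0).
def Pre_rescale_list (input_list : List Int) (size : Int) : Prop :=
  input_list ≠ [] ∧ size ≠ 0
instance (input_list : List Int) (size : Int) : Decidable (Pre_rescale_list input_list size) := by
  unfold Pre_rescale_list; infer_instance

def pvWitness_rescale_list : List Int × Int := ([3, 1, 4, 1, 5], 2)

def Spec_rescale_list (input_list : List Int) (size : Int) (out : List Int) : Prop := out = rescale_list_alt input_list size
instance (input_list : List Int) (size : Int) (out : List Int) : Decidable (Spec_rescale_list input_list size out) := by unfold Spec_rescale_list; infer_instance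

-- ===== CLAIM (what is proved, stated in full; the proofs are below) =====
def Claim_equal_rescale_list : Prop := ∀ (input_list : List Int) (size : Int), Dom_rescale_list input_list size → Pre_rescale_list input_list size → Spec_rescale_list input_list size (rescale_list input_list size)

-- ===== LEMMAS AND PROOFS =====

-- A's while-loop pads temp with singleton [last] sublists up to size sublists
theorem padTemp_eq (il : List Int) (size : Int) (temp : List (List Int)) :
    padTemp il size temp = temp ++ List.replicate (size - (temp.length : Int)).toNat [PySem.List.pyGetD il (-1) 0] := by
  fun_induction padTemp with
  | case1 temp h ih =>
    rw [ih]
    have h1 : (size - (temp.length : Int)).toNat = (size - ((temp ++ [[PySem.List.pyGetD il (-1) 0]]).length : Int)).toNat + 1 := by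
      simp; omega
    rw [h1, List.append_assoc, List.replicate_succ]
    simp
  | case2 temp h => rw [Int.toNat_of_nonpos (by omega)]; simp

theorem flatRep_length (xs : List Int) (c : Nat) :
    (xs.flatMap (List.replicate c)).length = xs.length * c := by
  induction xs with
  | nil => simp
  | cons x t ih => simp [List.flatMap_cons, ih]; ring

-- element j of x0*c ++ x1*c ++ … is element j / c of the original list
theorem flatRep_getElem? (xs : List Int) (c : Nat) (hc : 0 < c) : ∀ j, j < xs.length * c →
    (xs.flatMap (List.replicate c))[j]? = xs[j / c]? := by
  induction xs with
  | nil => simp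
  | cons x t ih =>
    intro j hj
    simp only [List.flatMap_cons, List.getElem?_append]
    by_cases h : j < c
    · simp [h, Nat.div_eq_of_lt h]
    · rcases Nat.exists_eq_add_of_le (not_lt.1 h) with ⟨k, rfl⟩
      rw [if_neg (by simp)]
      have hd : (c + k) / c = k / c + 1 := by rw [Nat.add_comm, Nat.add_div_right _ hc]
      have hk : k < t.length * c := by
        have : (t.length + 1) * c = t.length * c + c := by ring
        simp [this] at hj; omega
      rw [List.length_replicate, hd, Nat.add_sub_cancel_left, ih k hk]
      simp

-- downsampling branch, positive size: truncated stepped range = index formula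
theorem down_pos (il : List Int) (size : Int) (hpos : 0 < size)
    (hge : (il.length : Int) ≥ size) :
    PySem.List.slice ((PySem.List.pyRange 0 (il.length : Int) (PySem.Int.floordiv (il.length : Int) size)).map
        (fun i => PySem.List.pyGetD il i 0)) none (some size)
      = (PySem.List.pyRange 0 size 1).map (fun i => PySem.List.pyGetD il (i * PySem.Int.floordiv (il.length : Int) size) 0) := by
  set n : Int := (il.length : Int) with hn
  set skip := PySem.Int.floordiv n size with hskip
  have hsk1 : 1 ≤ skip := (PySem.Int.le_floordiv_iff_mul_le hpos).2 (by omega)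
  have hss : skip * size ≤ n := (PySem.Int.le_floordiv_iff_mul_le hpos).1 le_rfl
  rw [PySem.List.pyRange_of_pos 0 n (by omega), if_pos (by omega)]
  rw [PySem.List.slice_to _ (le_of_lt hpos)]
  rw [PySem.List.pyRange_one]
  rw [List.map_map, List.map_map, ← List.map_take, List.take_range]
  have hcnt : size.toNat ≤ ((n - 0 + skip - 1) / skip).toNat := by
    have : size ≤ (n - 0 + skip - 1) / skip := by
      rw [Int.le_ediv_iff_mul_le (by omega)]
      nlinarith
    omega
  rw [min_eq_left hcnt]
  rw [show size - 0 = size by ring]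
  apply List.map_congr_left
  intro k _
  simp only [Function.comp_apply]
  congr 1
  ring

-- downsampling branch, negative size: both sides are []
theorem down_neg (il : List Int) (size : Int) (hne : il ≠ []) (hneg : size < 0) :
    PySem.List.slice ((PySem.List.pyRange 0 (il.length : Int) (PySem.Int.floordiv (il.length : Int) size)).map
        (fun i => PySem.List.pyGetD il i 0)) none (some size)
      = (PySem.List.pyRange 0 size 1).map (fun i => PySem.List.pyGetD il (i * PySem.Int.floordiv (il.length : Int) size) 0) := by
  have hn1 : 1 ≤ (il.length : Int) := by
    have := List.length_pos_iff.2 hne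
    exact_mod_cast this
  have hskneg : PySem.Int.floordiv (il.length : Int) size < 0 := by
    have h := PySem.Int.floordiv_mul_add_mod (il.length : Int) size
    have hb := PySem.Int.mod_neg_bounds (a := (il.length : Int)) hneg
    by_contra h0
    have h0' := not_lt.1 h0
    nlinarith
  have hA : PySem.List.pyRange 0 (il.length : Int) (PySem.Int.floordiv (il.length : Int) size) = [] := by
    simp only [PySem.List.pyRange]
    rw [if_neg (by omega)]
    rw [if_neg (by omega), if_neg (by omega)]
    simp
  rw [hA, PySem.List.pyRange_one_eq_nil (by omega)]
  simp [PySem.List.slice]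

-- upsampling branch: replicate-pad-flatten-truncate = min(j // copy, n-1) formula
theorem up_eq (il : List Int) (size : Int) (hne : il ≠ []) (hlt : (il.length : Int) < size) :
    PySem.List.slice
      (padTemp il size (il.foldl (fun acc a => acc ++ [List.replicate (PySem.Int.floordiv size (il.length : Int)).toNat a]) [])).flatten
      none (some size)
      = (PySem.List.pyRange 0 size 1).map
          (fun j => PySem.List.pyGetD il (min (PySem.Int.floordiv j (PySem.Int.floordiv size (il.length : Int))) ((il.length : Int) - 1)) 0) := by
  have hn1 : 1 ≤ (il.length : Int) := by
    have := List.length_pos_iff.2 hne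
    exact_mod_cast this
  have hpos : 0 < size := by omega
  set n : Int := (il.length : Int) with hn
  set c := PySem.Int.floordiv size n with hc
  have hc1 : 1 ≤ c := (PySem.Int.le_floordiv_iff_mul_le (by omega)).2 (by omega)
  have hcn : c * n ≤ size := (PySem.Int.le_floordiv_iff_mul_le (by omega)).1 le_rfl
  have hcc : c = (c.toNat : Int) := (Int.toNat_of_nonneg (by omega)).symm
  rw [PySem.List.foldl_append_singleton_eq_map, List.nil_append, padTemp_eq]
  rw [List.flatten_append, ← List.flatMap_def, List.flatten_replicate_singleton]
  rw [PySem.List.slice_to _ (le_of_lt hpos), PySem.List.pyRange_one, List.map_map]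
  set last := PySem.List.pyGetD il (-1) 0 with hlast
  apply List.ext_getElem?
  intro j
  have hlenL : (il.flatMap (List.replicate c.toNat)).length = il.length * c.toNat := flatRep_length il c.toNat
  simp only [List.length_map]
  rw [List.getElem?_take, List.getElem?_map]
  have hmulI : ((il.length * c.toNat : Nat) : Int) ≤ size := by push_cast; nlinarith [hcn]
  have hmulN : il.length * c.toNat ≤ size.toNat := by omega
  have hmul1 : il.length ≤ il.length * c.toNat := Nat.le_mul_of_pos_right _ (by omega)
  by_cases hj : j < size.toNat
  · rw [if_pos hj, List.getElem?_range (by omega), List.getElem?_append, hlenL]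
    obtain ⟨q, hq⟩ : ∃ q, j / c.toNat = q := ⟨_, rfl⟩
    have hjc : PySem.Int.floordiv ((0 : Int) + (j : Int)) c = (q : Int) := by
      rw [zero_add, hcc, PySem.Int.floordiv_natCast]; simp [hq]
    by_cases hjl : j < il.length * c.toNat
    · rw [if_pos hjl, flatRep_getElem? il c.toNat (by omega) j hjl, hq]
      have hdiv : q < il.length := hq ▸ Nat.div_lt_of_lt_mul (by rw [Nat.mul_comm]; exact hjl)
      simp only [Option.map_some, Function.comp_apply, hjc]
      rw [min_eq_left (by omega), PySem.List.pyGetD_natCast, List.getD_eq_getElem?_getD,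
        List.getElem?_eq_getElem hdiv]
      simp
    · rw [if_neg hjl, List.getElem?_replicate, if_pos (by omega)]
      have hge2 : il.length ≤ q := hq ▸ (Nat.le_div_iff_mul_le (by omega)).2 (by omega)
      simp only [Option.map_some, Function.comp_apply, hjc]
      rw [min_eq_right (by omega)]
      have hm : (n - 1) = ((il.length - 1 : Nat) : Int) := by omega
      rw [hm, PySem.List.pyGetD_natCast, hlast, PySem.List.pyGetD_neg_one il 0 hne,
        List.getLast_eq_getElem, List.getD_eq_getElem?_getD,
        List.getElem?_eq_getElem (by have := List.length_pos_iff.2 hne; omega)]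
      simp
  · rw [if_neg hj, List.getElem?_eq_none (by simp; omega)]
    simp

-- ===== VERDICT (by name: the statement is the Claim_ definition above) =====
theorem rescale_list_spec : Claim_equal_rescale_list := by
  intro il size _ hpre
  obtain ⟨hne, hsz⟩ := hpre
  unfold Spec_rescale_list rescale_list rescale_list_alt
  by_cases hge : (il.length : Int) ≥ size
  · simp only [if_pos hge]
    rcases lt_or_gt_of_ne hsz with hneg | hpos
    · exact down_neg il size hne hneg
    · exact down_pos il size hpos hge
  · simp only [if_neg hge]
    exact up_eq il size hne (by omega)
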